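-- pv_equiv track=rewrite | github.com/shane0lin/alg101 | grind75/l2086/feed-hamster.py | minimumBuckets
-- ===== SOURCE A (Python) =====
-- def minimumBuckets(hamsters: str) -> int:
--     rst = 0
--     i, n = 0, len(hamsters)
--
--     while i < n:
--         if hamsters[i] == 'H':
--             if i+1 < n and hamsters[i + 1] == '.':
--                 rst += 1
--                 i += 2
--             elif i >0 and hamsters[i-1] == '.':
--                 rst += 1
--             else:
--                 return -1
--
--
--         i += 1
--
--     return rst
-- ===== SOURCE B (Python) =====
-- def minimumBuckets(hamsters: str) -> int:
--     n = len(hamsters)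
--     for i, c in enumerate(hamsters):
--         if c == 'H' and not ((i > 0 and hamsters[i - 1] == '.') or (i + 1 < n and hamsters[i + 1] == '.')):
--             return -1
--     return hamsters.count('H') - hamsters.count('H.H')
-- ===== Notes on version B (the rewrite author's own statement) =====
-- stated objective: simpler
-- what changed: Replaces the greedy index-jumping placement simulation with a feasibility scan (every hamster needs an adjacent dot) plus the closed formula count('H') - count('H.H'), each non-overlapping 'H.H' pattern letting one bucket feed two hamsters.
import Mathlib
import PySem

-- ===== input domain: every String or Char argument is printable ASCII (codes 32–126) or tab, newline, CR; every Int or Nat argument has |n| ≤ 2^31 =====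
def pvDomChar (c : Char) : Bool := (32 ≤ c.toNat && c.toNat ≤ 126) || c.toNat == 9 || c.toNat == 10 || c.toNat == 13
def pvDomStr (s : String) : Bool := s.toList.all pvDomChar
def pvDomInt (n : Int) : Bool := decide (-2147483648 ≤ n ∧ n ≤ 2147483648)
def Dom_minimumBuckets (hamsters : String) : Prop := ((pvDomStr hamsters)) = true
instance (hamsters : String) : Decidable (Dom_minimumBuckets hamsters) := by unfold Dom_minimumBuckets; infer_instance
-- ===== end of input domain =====

-- B replaces A's greedy index-jumping bucket-placement loop by a feasibility scan plus the
-- closed formula count('H') - count('H.H'); A = B is proved for every string.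

-- ===== PORT A =====
-- literal transliteration of A's while-loop: state (rst, i), same jumps ('i += 2' then 'i += 1' → i + 3)
def pvLoopA (l : List Char) (rst : Int) (i : Int) : Int :=
  if _h : i < (l.length : Int) then
    if PySem.List.pyGet? l i = some 'H' then
      if i + 1 < (l.length : Int) ∧ PySem.List.pyGet? l (i + 1) = some '.' then
        pvLoopA l (rst + 1) (i + 3)
      else if 0 < i ∧ PySem.List.pyGet? l (i - 1) = some '.' then
        pvLoopA l (rst + 1) (i + 1)
      else -1
    else pvLoopA l rst (i + 1)
  else rst
termination_by ((l.length : Int) - i).toNat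
decreasing_by all_goals omega

def minimumBuckets (hamsters : String) : Int :=
  pvLoopA hamsters.toList 0 0

-- ===== PORT B =====
-- B's validity scan: every 'H' must have a '.' neighbour, else early return -1
def pvChkB (l : List Char) (i : Nat) : Bool :=
  if _h : i < l.length then
    if PySem.List.pyGet? l (i : Int) = some 'H' ∧
        ¬ ((0 < i ∧ PySem.List.pyGet? l ((i : Int) - 1) = some '.') ∨
           (i + 1 < l.length ∧ PySem.List.pyGet? l ((i : Int) + 1) = some '.')) then
      false
    else pvChkB l (i + 1)
  else true
termination_by l.length - i

def minimumBuckets_alt (hamsters : String) : Int :=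
  if pvChkB hamsters.toList 0 then
    (PySem.Str.count hamsters "H" : Int) - (PySem.Str.count hamsters "H.H" : Int)
  else -1

-- ===== PRECONDITION & SPEC =====
def Spec_minimumBuckets (hamsters : String) (out : Int) : Prop := out = minimumBuckets_alt hamsters
instance (hamsters : String) (out : Int) : Decidable (Spec_minimumBuckets hamsters out) := by unfold Spec_minimumBuckets; infer_instance

-- ===== CLAIM (what is proved, stated in full; the proofs are below) =====
def Claim_equal_minimumBuckets : Prop := ∀ (hamsters : String), Dom_minimumBuckets hamsters → Spec_minimumBuckets hamsters (minimumBuckets hamsters)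

-- ===== LEMMAS AND PROOFS =====

def pvCnt3 : List Char → Nat
  | a :: b :: c :: rest => if a = 'H' ∧ b = '.' ∧ c = 'H' then 1 + pvCnt3 rest else pvCnt3 (b :: c :: rest)
  | _ :: rest => pvCnt3 rest
  | [] => 0

lemma cnt3_cons_not_H {a : Char} (h : a ≠ 'H') (rest : List Char) :
    pvCnt3 (a :: rest) = pvCnt3 rest := by
  match rest with
  | [] => rfl
  | [b] => rfl
  | b :: c :: r => simp [pvCnt3, h]

lemma cnt3_H_not_dot {rest : List Char} (h : rest.head? ≠ some '.') :
    pvCnt3 ('H' :: rest) = pvCnt3 rest := by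
  match rest with
  | [] => rfl
  | [b] => rfl
  | b :: c :: r =>
    have hb : b ≠ '.' := by simpa using h
    simp [pvCnt3, hb]

lemma cnt3_Hdot_other {c : Char} (h : c ≠ 'H') (rest : List Char) :
    pvCnt3 ('H' :: '.' :: c :: rest) = pvCnt3 rest := by
  have : pvCnt3 ('H' :: '.' :: c :: rest) = pvCnt3 ('.' :: c :: rest) := by simp [pvCnt3, h]
  rw [this, cnt3_cons_not_H (by decide), cnt3_cons_not_H h]

lemma count_go_single : ∀ (fuel : Nat) (l : List Char) (acc : Nat), l.length ≤ fuel →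
    PySem.Chars.count.go ['H'] fuel l acc = acc + l.count 'H' := by
  intro fuel
  induction fuel with
  | zero => intro l acc h; interval_cases h' : l.length <;> simp_all [PySem.Chars.count.go]
  | succ n ih =>
    intro l acc h
    match l with
    | [] => simp [PySem.Chars.count.go]
    | a :: t =>
      by_cases ha : a = 'H'
      · subst ha
        simp only [PySem.Chars.count.go, List.isPrefixOf, List.count_cons]
        rw [if_pos (by simp)]
        rw [show List.drop (['H'] : List Char).length ('H'::t) = t from rfl]
        rw [ih t (acc+1) (by simpa using h)]
        simp
        omega
      · simp only [PySem.Chars.count.go, List.isPrefixOf]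
        rw [if_neg (by simp [beq_iff_eq]; exact fun hh => ha hh.symm)]
        rw [ih t acc (by simpa using h)]
        simp [List.count_cons]
        intro hh; exact ha hh

lemma count_go_HdotH : ∀ (fuel : Nat) (l : List Char) (acc : Nat), l.length ≤ fuel →
    PySem.Chars.count.go ['H', '.', 'H'] fuel l acc = acc + pvCnt3 l := by
  intro fuel
  induction fuel with
  | zero =>
    intro l acc h
    have : l = [] := by cases l <;> simp_all
    subst this; rfl
  | succ n ih =>
    intro l acc h
    match l with
    | [] => simp [PySem.Chars.count.go, pvCnt3]
    | a :: t =>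
      by_cases hpre : List.isPrefixOf ['H', '.', 'H'] (a :: t) = true
      · obtain ⟨r, hr⟩ := (List.isPrefixOf_iff_prefix.mp hpre)
        have he : a :: t = 'H' :: '.' :: 'H' :: r := by rw [← hr]; rfl
        rw [he] at h ⊢
        simp only [PySem.Chars.count.go]
        rw [if_pos (by simp [List.isPrefixOf])]
        rw [show List.drop (['H','.','H'] : List Char).length ('H'::'.'::'H'::r) = r from rfl]
        rw [ih r (acc+1) (by simp at h ⊢; omega)]
        simp [pvCnt3]
        omega
      · simp only [PySem.Chars.count.go]
        rw [if_neg hpre]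
        rw [ih t acc (by simpa using Nat.le_of_succ_le_succ (by simpa using h))]
        congr 1
        match t with
        | [] => rfl
        | [b] => rfl
        | b :: c :: r =>
          rw [show pvCnt3 (a :: b :: c :: r) = if a = 'H' ∧ b = '.' ∧ c = 'H' then 1 + pvCnt3 r else pvCnt3 (b :: c :: r) from rfl]
          rw [if_neg ?_]
          rintro ⟨rfl, rfl, rfl⟩
          simp [List.isPrefixOf] at hpre

def pvF : Bool → List Char → Option Int
  | _, [] => some 0
  | _, 'H' :: '.' :: [] => some 1
  | _, 'H' :: '.' :: c :: rest => (pvF (c == '.') rest).map (· + 1)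
  | p, 'H' :: rest => if p then (pvF false rest).map (· + 1) else none
  | _, c :: rest => pvF (c == '.') rest

def pvValid : Bool → List Char → Bool
  | p, c :: rest => (if c = 'H' then p || (rest.head? == some '.') else true) && pvValid (c == '.') rest
  | _, [] => true

lemma pvF_eq (p : Bool) (l : List Char) :
    pvF p l = if pvValid p l then some ((l.count 'H' : Int) - (pvCnt3 l : Int)) else none := by
  fun_induction pvF p l with
  | case1 => simp [pvValid, pvCnt3]
  | case2 => simp [pvValid, pvCnt3, List.count_cons]
  | case3 x c rest ih =>
    rw [ih]
    have hv : pvValid x ('H' :: '.' :: c :: rest) = pvValid (c == '.') rest := by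
      by_cases hc : c = 'H' <;> simp [pvValid, hc]
    rw [hv]
    by_cases hval : pvValid (c == '.') rest = true
    · simp only [hval, if_true, Option.map_some]
      congr 1
      by_cases hc : c = 'H'
      · subst hc
        rw [show pvCnt3 ('H'::'.'::'H'::rest) = 1 + pvCnt3 rest from by simp [pvCnt3]]
        simp [List.count_cons]
        push_cast
        ring
      · rw [cnt3_Hdot_other hc]
        simp [List.count_cons, hc]
        push_cast
        ring
    · simp [hval]
  | case4 rest h1 h2 ih =>
    have hd : rest.head? ≠ some '.' := by
      match rest with
      | [] => simp
      | c :: r =>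
        simp only [List.head?, ne_eq, Option.some.injEq]
        intro hcc
        subst hcc
        match r with
        | [] => exact h1 rfl
        | c2 :: r2 => exact h2 c2 r2 rfl
    rw [ih]
    have hv : pvValid true ('H' :: rest) = pvValid false rest := by
      simp [pvValid]
    rw [hv, cnt3_H_not_dot hd]
    by_cases hval : pvValid false rest = true
    · simp [hval, List.count_cons]
      push_cast
      ring
    · simp [hval]
  | case5 p rest h1 h2 hp =>
    have hd : rest.head? ≠ some '.' := by
      match rest with
      | [] => simp
      | c :: r =>
        simp only [List.head?, ne_eq, Option.some.injEq]
        intro hcc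
        subst hcc
        match r with
        | [] => exact h1 rfl
        | c2 :: r2 => exact h2 c2 r2 rfl
    have : pvValid p ('H' :: rest) = false := by
      simp only [pvValid, if_pos rfl]
      have : (rest.head? == some '.') = false := by simpa using hd
      simp [this, Bool.eq_false_iff.mp (by simpa using hp)]
    simp [this]
  | case6 x c rest hn1 hn2 hc ih =>
    have hcH : c ≠ 'H' := fun h => hc h
    rw [ih, cnt3_cons_not_H hcH]
    have hv : pvValid x (c :: rest) = pvValid (c == '.') rest := by
      simp [pvValid, hcH]
    rw [hv]
    by_cases hval : pvValid (c == '.') rest = true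
    · simp [hval, List.count_cons, hcH]
    · simp [hval]


lemma pvF_cons_not_H {c : Char} (hc : c ≠ 'H') (p : Bool) (rest : List Char) :
    pvF p (c :: rest) = pvF (c == '.') rest := by
  match rest with
  | [] => simp [pvF, hc]
  | ['.'] => simp [pvF, hc]
  | '.' :: c2 :: r => simp [pvF, hc]
  | c1 :: r => simp [pvF, hc]

lemma pvF_H_not_dot {rest : List Char} (h : rest.head? ≠ some '.') (p : Bool) :
    pvF p ('H' :: rest) = if p then (pvF false rest).map (· + 1) else none := by
  match rest with
  | [] => simp [pvF]
  | c :: r =>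
    have hc : c ≠ '.' := by simpa using h
    match r with
    | [] => simp [pvF, hc]
    | c2 :: r2 => simp [pvF, hc]

def pvPrev (l : List Char) (i : Nat) : Bool := decide (0 < i) && (l[i - 1]? == some '.')


lemma loopA_eq_pvF : ∀ (k : Nat) (l : List Char) (i : Nat), l.length - i ≤ k → i ≤ l.length → ∀ (rst : Int),
    pvLoopA l rst (i : Int) =
      match pvF (pvPrev l i) (l.drop i) with
      | some m => rst + m
      | none => -1 := by
  intro k
  induction k with
  | zero =>
    intro l i hk hi rst
    have hil : i = l.length := by omega
    rw [pvLoopA]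
    rw [dif_neg (by omega)]
    subst hil
    simp [pvF]
  | succ n ih =>
    intro l i hk hi rst
    by_cases hil : i < l.length
    case neg =>
      have hil' : i = l.length := by omega
      rw [pvLoopA, dif_neg (by omega)]
      subst hil'
      simp [pvF]
    case pos =>
      have hdrop : l.drop i = l[i] :: l.drop (i + 1) := List.drop_eq_getElem_cons hil
      rw [pvLoopA, dif_pos (by exact_mod_cast hil)]
      rw [show ((i : Int)) = ((i : Nat) : Int) from rfl, PySem.List.pyGet?_natCast,
        List.getElem?_eq_getElem hil]
      by_cases hH : l[i] = 'H'
      case pos =>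
        rw [if_pos (by rw [hH])]
        by_cases h2 : i + 1 < l.length ∧ l[i + 1]? = some '.'
        case pos =>
          obtain ⟨h2a, h2b⟩ := h2
          have h2b' : l[i+1] = '.' := by rw [List.getElem?_eq_getElem h2a] at h2b; simpa using h2b
          rw [if_pos ⟨by exact_mod_cast h2a, by
            rw [show ((i : Int) + 1) = (((i + 1 : Nat)) : Int) from by push_cast; ring, PySem.List.pyGet?_natCast]; exact h2b⟩]
          have hdrop2 : l.drop (i + 1) = l[i+1] :: l.drop (i + 2) := List.drop_eq_getElem_cons h2a
          by_cases h3 : i + 2 < l.length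
          case pos =>
            have hdrop3 : l.drop (i + 2) = l[i+2] :: l.drop (i + 3) := List.drop_eq_getElem_cons h3
            rw [show ((i : Int) + 3) = (((i + 3 : Nat)) : Int) from by push_cast; ring]
            rw [ih l (i + 3) (by omega) (by omega) (rst + 1)]
            rw [hdrop, hdrop2, hdrop3, hH, h2b']
            rw [show pvF (pvPrev l i) ('H' :: '.' :: l[i+2] :: l.drop (i+3)) =
              (pvF (l[i+2] == '.') (l.drop (i+3))).map (· + 1) from rfl]
            have hprev : pvPrev l (i + 3) = (l[i+2] == '.') := by
              simp [pvPrev, List.getElem?_eq_getElem h3]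
            rw [hprev]
            cases pvF (l[i+2] == '.') (l.drop (i+3)) <;> simp <;> ring
          case neg =>
            have hlen : l.length = i + 2 := by omega
            rw [pvLoopA, dif_neg (by omega)]
            rw [hdrop, hdrop2, hH, h2b', show l.drop (i+2) = [] from by
              apply List.drop_eq_nil_of_le; omega]
            rw [show pvF (pvPrev l i) ['H', '.'] = some 1 from rfl]
        case neg =>
          have hno : (l.drop (i+1)).head? ≠ some '.' := by
            by_cases hlt : i + 1 < l.length
            · rw [List.drop_eq_getElem_cons hlt]
              simp only [List.head?, ne_eq, Option.some.injEq]
              intro hc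
              exact h2 ⟨hlt, by rw [List.getElem?_eq_getElem hlt, hc]⟩
            · rw [show l.drop (i+1) = [] from List.drop_eq_nil_of_le (by omega)]
              simp
          rw [if_neg (by
            rintro ⟨ha, hb⟩
            rw [show ((i : Int) + 1) = (((i + 1 : Nat)) : Int) from by push_cast; ring, PySem.List.pyGet?_natCast] at hb
            exact h2 ⟨by exact_mod_cast ha, hb⟩)]
          rw [hdrop, hH, pvF_H_not_dot hno]
          by_cases h3 : 0 < i ∧ l[i-1]? = some '.'
          case pos =>
            have hprevT : pvPrev l i = true := by simp [pvPrev, h3.1, h3.2]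
            rw [if_pos ⟨by exact_mod_cast h3.1, by
              rw [show ((i : Int) - 1) = (((i - 1 : Nat)) : Int) from by omega, PySem.List.pyGet?_natCast]; exact h3.2⟩]
            rw [show ((i : Int) + 1) = (((i + 1 : Nat)) : Int) from by push_cast; ring]
            rw [ih l (i + 1) (by omega) (by omega) (rst + 1)]
            have hprev1 : pvPrev l (i + 1) = false := by
              simp [pvPrev, List.getElem?_eq_getElem hil, hH]
            rw [hprev1, hprevT, if_pos rfl]
            cases pvF false (l.drop (i+1)) <;> simp <;> ring
          case neg =>
            have hprevF : pvPrev l i = false := by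
              by_cases h0 : 0 < i
              · have : ¬ l[i-1]? = some '.' := fun hc => h3 ⟨h0, hc⟩
                simp [pvPrev, this]
              · simp [pvPrev, h0]
            rw [if_neg (by
              rintro ⟨ha, hb⟩
              have h0 : 0 < i := by exact_mod_cast ha
              rw [show ((i : Int) - 1) = (((i - 1 : Nat)) : Int) from by omega, PySem.List.pyGet?_natCast] at hb
              exact h3 ⟨h0, hb⟩)]
            rw [hprevF]
            simp
      case neg =>
        rw [if_neg (by simpa using hH)]
        rw [show ((i : Int) + 1) = (((i + 1 : Nat)) : Int) from by push_cast; ring]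
        rw [ih l (i + 1) (by omega) (by omega) rst]
        rw [hdrop, pvF_cons_not_H hH]
        have hprev1 : pvPrev l (i + 1) = (l[i] == '.') := by
          simp [pvPrev, List.getElem?_eq_getElem hil]
        rw [hprev1]


lemma chkB_eq_pvValid : ∀ (k : Nat) (l : List Char) (i : Nat), l.length - i ≤ k → i ≤ l.length →
    pvChkB l i = pvValid (pvPrev l i) (l.drop i) := by
  intro k
  induction k with
  | zero =>
    intro l i hk hi
    have : i = l.length := by omega
    rw [pvChkB, dif_neg (by omega)]
    subst this
    simp [pvValid]
  | succ n ih =>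
    intro l i hk hi
    by_cases hil : i < l.length
    case neg =>
      have : i = l.length := by omega
      rw [pvChkB, dif_neg (by omega)]
      subst this
      simp [pvValid]
    case pos =>
      have hdrop : l.drop i = l[i] :: l.drop (i + 1) := List.drop_eq_getElem_cons hil
      rw [pvChkB, dif_pos hil, hdrop]
      rw [show pvValid (pvPrev l i) (l[i] :: l.drop (i+1)) =
        ((if l[i] = 'H' then pvPrev l i || ((l.drop (i+1)).head? == some '.') else true) &&
          pvValid (l[i] == '.') (l.drop (i+1))) from rfl]
      have hget : PySem.List.pyGet? l (i : Int) = some l[i] := by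
        rw [show ((i : Int)) = ((i : Nat) : Int) from rfl, PySem.List.pyGet?_natCast, List.getElem?_eq_getElem hil]
      have hprev1 : pvPrev l (i + 1) = (l[i] == '.') := by
        simp [pvPrev, List.getElem?_eq_getElem hil]
      have hnext : ((l.drop (i+1)).head? == some '.') =
          decide (i + 1 < l.length ∧ PySem.List.pyGet? l ((i : Int) + 1) = some '.') := by
        by_cases hlt : i + 1 < l.length
        · rw [List.drop_eq_getElem_cons hlt]
          rw [show ((i : Int) + 1) = (((i + 1 : Nat)) : Int) from by push_cast; ring, PySem.List.pyGet?_natCast,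
            List.getElem?_eq_getElem hlt]
          simp [hlt]
          exact Bool.beq_eq_decide_eq _ _
        · rw [show l.drop (i+1) = [] from List.drop_eq_nil_of_le (by omega)]
          simp [hlt]
      have hpv : pvPrev l i = decide (0 < i ∧ PySem.List.pyGet? l ((i : Int) - 1) = some '.') := by
        by_cases h0 : 0 < i
        · rw [show ((i : Int) - 1) = (((i - 1 : Nat)) : Int) from by omega, PySem.List.pyGet?_natCast]
          simp [pvPrev, h0]
          exact Bool.beq_eq_decide_eq _ _
        · simp [pvPrev, h0, show i = 0 from by omega]
      by_cases hcond : PySem.List.pyGet? l (i : Int) = some 'H' ∧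
          ¬ ((0 < i ∧ PySem.List.pyGet? l ((i : Int) - 1) = some '.') ∨
             (i + 1 < l.length ∧ PySem.List.pyGet? l ((i : Int) + 1) = some '.'))
      · rw [if_pos hcond]
        have hH : l[i] = 'H' := by rw [hget] at hcond; exact (Option.some_inj.mp hcond.1)
        rw [if_pos hH]
        have : (pvPrev l i || ((l.drop (i+1)).head? == some '.')) = false := by
          rw [hnext, hpv]
          push_neg at hcond
          obtain ⟨-, hc2⟩ := hcond
          rcases Decidable.em (0 < i ∧ PySem.List.pyGet? l ((i : Int) - 1) = some '.') with h | h
          · exact absurd (Or.inl h) (by tauto)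
          · simp [h]
            intro hlt hgc
            exact absurd (Or.inr (And.intro hlt hgc) :
              (0 < i ∧ PySem.List.pyGet? l ((i : Int) - 1) = some '.') ∨
              (i + 1 < l.length ∧ PySem.List.pyGet? l ((i : Int) + 1) = some '.')) (by tauto)
        rw [this, Bool.false_and]
      · rw [if_neg hcond]
        rw [ih l (i + 1) (by omega) (by omega), hprev1]
        by_cases hH : l[i] = 'H'
        · rw [if_pos hH]
          have : (pvPrev l i || ((l.drop (i+1)).head? == some '.')) = true := by
            rw [hnext, hpv]
            rw [hget, hH] at hcond
            push_neg at hcond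
            have := hcond rfl
            rcases this with h | h
            · simp [h]
            · simp [h]
          rw [this, Bool.true_and]
        · rw [if_neg hH, Bool.true_and]

theorem pv_main (s : String) : minimumBuckets s = minimumBuckets_alt s := by
  set l := s.toList with hl
  have hA : minimumBuckets s =
      match pvF false l with
      | some m => (0 : Int) + m
      | none => -1 := by
    rw [show minimumBuckets s = pvLoopA l 0 ((0 : Nat) : Int) from rfl]
    rw [loopA_eq_pvF l.length l 0 (by omega) (by omega) 0]
    rw [show pvPrev l 0 = false from rfl, List.drop_zero]
  have hB : pvChkB l 0 = pvValid false l := by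
    rw [chkB_eq_pvValid l.length l 0 (by omega) (by omega)]
    rw [show pvPrev l 0 = false from rfl, List.drop_zero]
  have hc1 : PySem.Str.count s "H" = l.count 'H' := by
    rw [PySem.Str.count_eq]
    rw [show PySem.Chars.count s.toList "H".toList = PySem.Chars.count.go "H".toList s.toList.length s.toList 0 from by
      rw [PySem.Chars.count]; rfl]
    rw [show ("H".toList) = ['H'] from rfl]
    rw [count_go_single l.length l 0 (by omega)]
    omega
  have hc3 : PySem.Str.count s "H.H" = pvCnt3 l := by
    rw [PySem.Str.count_eq]
    rw [show PySem.Chars.count s.toList "H.H".toList = PySem.Chars.count.go "H.H".toList s.toList.length s.toList 0 from by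
      rw [PySem.Chars.count]; rfl]
    rw [show ("H.H".toList) = ['H', '.', 'H'] from rfl]
    rw [count_go_HdotH l.length l 0 (by omega)]
    omega
  rw [hA, pvF_eq]
  rw [show minimumBuckets_alt s = (if pvChkB l 0 then (PySem.Str.count s "H" : Int) - (PySem.Str.count s "H.H" : Int) else -1) from rfl]
  rw [hB, hc1, hc3]
  by_cases hv : pvValid false l = true
  · simp [hv]
  · simp [hv]

-- ===== VERDICT (by name: the statement is the Claim_ definition above) =====
theorem minimumBuckets_spec : Claim_equal_minimumBuckets := by
  intro s _
  unfold Spec_minimumBuckets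
  exact pv_main s
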